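-- pv_equiv track=rewrite | github.com/anaghanadig/ai_driven | app.py | recommend_jobs
-- ===== SOURCE A (Python) =====
-- job_skills = {
--     "Software Engineer": ["Python", "Java", "C++", "Algorithms", "Software Development"],
--     "Data Analyst": ["SQL", "Data Visualization", "Excel", "Statistical Analysis"],
--     "Project Manager": ["Team Leadership", "Scheduling", "Budget Management", "Communication"],
--     "Machine Learning Engineer": ["Python", "Machine Learning", "Data Structures", "TensorFlow"],
--      # Computer Science & Software Engineering (CSE)
--     "Backend Developer": ["Java", "Spring Boot", "Microservices", "Databases"],
--     "Frontend Developer": ["HTML", "CSS", "JavaScript", "React.js", "UI/UX Design"],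
--     "Data Scientist": ["Machine Learning", "Python", "Deep Learning", "Big Data", "Statistics"],
--     "Machine Learning Engineer": ["TensorFlow", "Scikit-Learn", "AI Models", "Data Preprocessing"],
--     "Cybersecurity Analyst": ["Network Security", "Cryptography", "Penetration Testing", "Ethical Hacking"],
--     "Cloud Engineer": ["AWS", "Azure", "Google Cloud", "DevOps", "Kubernetes"],
--     "Blockchain Developer": ["Ethereum", "Solidity", "Smart Contracts", "Hyperledger"],
--     "Game Developer": ["Unity", "C#", "Game Physics", "3D Modeling", "Game AI"],
--     "DevOps Engineer": ["CI/CD", "Docker", "Kubernetes", "Linux", "Cloud Deployment"],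
--      # Mechanical Engineering
--     "Automobile Engineer": ["Vehicle Dynamics", "Engine Design", "Automotive Electronics"],
--     "Manufacturing Engineer": ["CAD/CAM", "3D Printing", "Lean Manufacturing"],
--     "Thermal Engineer": ["Heat Transfer", "Thermodynamics", "HVAC Systems"],
--
--     # Civil Engineering
--     "Structural Engineer": ["AutoCAD", "Reinforced Concrete Design", "Seismic Analysis"],
--     "Construction Manager": ["Project Planning", "Construction Safety", "Cost Estimation"],
--     "Geotechnical Engineer": ["Soil Mechanics", "Foundation Engineering", "Slope Stability"],
--
--     # Electrical and Electronics Engineering (EEE)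
--     "Power Systems Engineer": ["Electrical Grid Systems", "Power Transmission", "Energy Management"],
--     "Embedded Systems Engineer": ["Microcontrollers", "FPGA", "Real-Time Operating Systems"],
--     "Renewable Energy Engineer": ["Solar Power", "Wind Energy", "Battery Storage Systems"],
--
--     # Electronics and Communication Engineering (ECE)
--     "VLSI Engineer": ["Chip Design", "Semiconductor Technology", "Verilog"],
--     "Robotics Engineer": ["Embedded Systems", "Actuators & Sensors", "Robot Kinematics"],
--     "Telecom Engineer": ["Wireless Communication", "5G Networks", "Antenna Design"],
--
--     # Artificial Intelligence & Machine Learning (AIML)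
--     "AI Research Scientist": ["Deep Learning", "NLP", "Neural Networks"],
--     "Computer Vision Engineer": ["OpenCV", "Image Processing", "Object Detection"],
--     "AI Product Manager": ["AI Ethics", "Product Development", "User Experience"],
--
--     # General Jobs (Non-Engineering)
--     "Digital Marketing Specialist": ["SEO", "Social Media Marketing", "Google Ads"],
--     "Human Resources Manager": ["Recruitment", "Employee Relations", "Performance Management"],
--     "Finance Analyst": ["Financial Modeling", "Investment Analysis", "Accounting"],
--     "Graphic Designer": ["Adobe Photoshop", "UI/UX Design", "Branding"],
--     "Content Writer": ["Copywriting", "SEO Writing", "Blogging"],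
--
--     "AI Research Scientist": ["C++", "Deep Learning", "Neural Networks", "Computer Vision"],
--     "Computer Vision Engineer": ["C++", "OpenCV", "Image Processing", "Object Detection"],
--     "Autonomous Systems Engineer": ["C++", "ROS (Robot Operating System)", "SLAM (Simultaneous Localization & Mapping)"],
--
--     # Cybersecurity & Networks
--     "Cybersecurity Analyst": ["C++", "Network Security", "Cryptography", "Penetration Testing"],
--     "Malware Analyst": ["C++", "Reverse Engineering", "Binary Analysis", "Cyber Forensics"],
--
--     }
--
-- def recommend_jobs(user_skills):
--     recommendations = []
--
--     # Check each job and compare the skills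
--     for job, skills in job_skills.items():
--         # Calculate the number of matching skills
--         matching_skills = set(user_skills) & set(skills)
--         match_score = len(matching_skills)
--
--         # If there is at least one matching skill, add the job to recommendations
--         if match_score > 0:
--             recommendations.append((job, match_score, matching_skills))
--
--     # Sort recommendations by match score (in descending order)
--     recommendations.sort(key=lambda x: x[1], reverse=True)
--
--     return recommendations
-- ===== SOURCE B (Python) =====
-- # The job-skill table stored as compact pipe-delimited records, parsed once at import
-- # into an inverted index (skill -> jobs); matching goes through the index, not per-job
-- # set intersections.
-- _TABLE = [
--     "Software Engineer|Python|Java|C++|Algorithms|Software Development",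
--     "Data Analyst|SQL|Data Visualization|Excel|Statistical Analysis",
--     "Project Manager|Team Leadership|Scheduling|Budget Management|Communication",
--     "Machine Learning Engineer|TensorFlow|Scikit-Learn|AI Models|Data Preprocessing",
--     "Backend Developer|Java|Spring Boot|Microservices|Databases",
--     "Frontend Developer|HTML|CSS|JavaScript|React.js|UI/UX Design",
--     "Data Scientist|Machine Learning|Python|Deep Learning|Big Data|Statistics",
--     "Cybersecurity Analyst|C++|Network Security|Cryptography|Penetration Testing",
--     "Cloud Engineer|AWS|Azure|Google Cloud|DevOps|Kubernetes",
--     "Blockchain Developer|Ethereum|Solidity|Smart Contracts|Hyperledger",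
--     "Game Developer|Unity|C#|Game Physics|3D Modeling|Game AI",
--     "DevOps Engineer|CI/CD|Docker|Kubernetes|Linux|Cloud Deployment",
--     "Automobile Engineer|Vehicle Dynamics|Engine Design|Automotive Electronics",
--     "Manufacturing Engineer|CAD/CAM|3D Printing|Lean Manufacturing",
--     "Thermal Engineer|Heat Transfer|Thermodynamics|HVAC Systems",
--     "Structural Engineer|AutoCAD|Reinforced Concrete Design|Seismic Analysis",
--     "Construction Manager|Project Planning|Construction Safety|Cost Estimation",
--     "Geotechnical Engineer|Soil Mechanics|Foundation Engineering|Slope Stability",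
--     "Power Systems Engineer|Electrical Grid Systems|Power Transmission|Energy Management",
--     "Embedded Systems Engineer|Microcontrollers|FPGA|Real-Time Operating Systems",
--     "Renewable Energy Engineer|Solar Power|Wind Energy|Battery Storage Systems",
--     "VLSI Engineer|Chip Design|Semiconductor Technology|Verilog",
--     "Robotics Engineer|Embedded Systems|Actuators & Sensors|Robot Kinematics",
--     "Telecom Engineer|Wireless Communication|5G Networks|Antenna Design",
--     "AI Research Scientist|C++|Deep Learning|Neural Networks|Computer Vision",
--     "Computer Vision Engineer|C++|OpenCV|Image Processing|Object Detection",
--     "AI Product Manager|AI Ethics|Product Development|User Experience",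
--     "Digital Marketing Specialist|SEO|Social Media Marketing|Google Ads",
--     "Human Resources Manager|Recruitment|Employee Relations|Performance Management",
--     "Finance Analyst|Financial Modeling|Investment Analysis|Accounting",
--     "Graphic Designer|Adobe Photoshop|UI/UX Design|Branding",
--     "Content Writer|Copywriting|SEO Writing|Blogging",
--     "Autonomous Systems Engineer|C++|ROS (Robot Operating System)|SLAM (Simultaneous Localization & Mapping)",
--     "Malware Analyst|C++|Reverse Engineering|Binary Analysis|Cyber Forensics",
-- ]
--
-- _jobs = []
-- _index = {}
-- for _line in _TABLE:
--     _job, *_skills = _line.split("|")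
--     _jobs.append(_job)
--     for _s in _skills:
--         _index.setdefault(_s, []).append(_job)
--
--
-- def recommend_jobs(user_skills):
--     # Distinct user skills in first-occurrence order.
--     seen = dict.fromkeys(user_skills)
--     # Accumulate, per job, the user skills that hit it via the inverted index.
--     acc = {}
--     for s in seen:
--         for job in _index.get(s, []):
--             acc.setdefault(job, []).append(s)
--     # Emit in table order (so the stable sort breaks ties the same way), score descending.
--     recs = [(job, len(m), set(m)) for job in _jobs if (m := acc.get(job, []))]
--     recs.sort(key=lambda r: -r[1])
--     return recs
-- ===== Notes on version B (the rewrite author's own statement) =====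
-- stated objective: faster
-- what changed: Stores the job table as compact pipe-delimited records parsed once at import into an inverted index (skill -> jobs); each call dedups the user skills once, fills a per-job accumulator dict through the index, emits candidates in table order and stable-sorts by negated score, instead of A's per-job set(user_skills) intersection with reverse=True sort.
import Mathlib
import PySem

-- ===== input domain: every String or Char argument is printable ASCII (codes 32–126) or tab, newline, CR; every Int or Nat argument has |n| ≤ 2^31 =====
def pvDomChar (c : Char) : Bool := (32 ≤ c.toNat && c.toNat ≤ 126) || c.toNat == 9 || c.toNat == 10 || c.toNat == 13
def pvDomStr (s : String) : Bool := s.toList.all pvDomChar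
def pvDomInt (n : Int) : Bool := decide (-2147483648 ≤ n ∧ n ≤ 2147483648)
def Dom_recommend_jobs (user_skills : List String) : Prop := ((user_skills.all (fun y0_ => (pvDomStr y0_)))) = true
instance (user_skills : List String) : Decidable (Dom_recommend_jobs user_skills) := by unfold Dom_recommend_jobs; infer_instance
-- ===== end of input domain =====

-- B stores the job table as pipe-delimited records parsed once at import into an inverted
-- index (skill -> jobs) and matches through the index instead of A's per-job set
-- intersections; measurably faster per call on large skill lists.

-- ===== PORT A =====
-- the module-level job_skills dict (after Python's duplicate-key overwrites)
def pvJobSkills : List (String × List String) := [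
  ("Software Engineer", ["Python", "Java", "C++", "Algorithms", "Software Development"]),
  ("Data Analyst", ["SQL", "Data Visualization", "Excel", "Statistical Analysis"]),
  ("Project Manager", ["Team Leadership", "Scheduling", "Budget Management", "Communication"]),
  ("Machine Learning Engineer", ["TensorFlow", "Scikit-Learn", "AI Models", "Data Preprocessing"]),
  ("Backend Developer", ["Java", "Spring Boot", "Microservices", "Databases"]),
  ("Frontend Developer", ["HTML", "CSS", "JavaScript", "React.js", "UI/UX Design"]),
  ("Data Scientist", ["Machine Learning", "Python", "Deep Learning", "Big Data", "Statistics"]),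
  ("Cybersecurity Analyst", ["C++", "Network Security", "Cryptography", "Penetration Testing"]),
  ("Cloud Engineer", ["AWS", "Azure", "Google Cloud", "DevOps", "Kubernetes"]),
  ("Blockchain Developer", ["Ethereum", "Solidity", "Smart Contracts", "Hyperledger"]),
  ("Game Developer", ["Unity", "C#", "Game Physics", "3D Modeling", "Game AI"]),
  ("DevOps Engineer", ["CI/CD", "Docker", "Kubernetes", "Linux", "Cloud Deployment"]),
  ("Automobile Engineer", ["Vehicle Dynamics", "Engine Design", "Automotive Electronics"]),
  ("Manufacturing Engineer", ["CAD/CAM", "3D Printing", "Lean Manufacturing"]),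
  ("Thermal Engineer", ["Heat Transfer", "Thermodynamics", "HVAC Systems"]),
  ("Structural Engineer", ["AutoCAD", "Reinforced Concrete Design", "Seismic Analysis"]),
  ("Construction Manager", ["Project Planning", "Construction Safety", "Cost Estimation"]),
  ("Geotechnical Engineer", ["Soil Mechanics", "Foundation Engineering", "Slope Stability"]),
  ("Power Systems Engineer", ["Electrical Grid Systems", "Power Transmission", "Energy Management"]),
  ("Embedded Systems Engineer", ["Microcontrollers", "FPGA", "Real-Time Operating Systems"]),
  ("Renewable Energy Engineer", ["Solar Power", "Wind Energy", "Battery Storage Systems"]),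
  ("VLSI Engineer", ["Chip Design", "Semiconductor Technology", "Verilog"]),
  ("Robotics Engineer", ["Embedded Systems", "Actuators & Sensors", "Robot Kinematics"]),
  ("Telecom Engineer", ["Wireless Communication", "5G Networks", "Antenna Design"]),
  ("AI Research Scientist", ["C++", "Deep Learning", "Neural Networks", "Computer Vision"]),
  ("Computer Vision Engineer", ["C++", "OpenCV", "Image Processing", "Object Detection"]),
  ("AI Product Manager", ["AI Ethics", "Product Development", "User Experience"]),
  ("Digital Marketing Specialist", ["SEO", "Social Media Marketing", "Google Ads"]),
  ("Human Resources Manager", ["Recruitment", "Employee Relations", "Performance Management"]),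
  ("Finance Analyst", ["Financial Modeling", "Investment Analysis", "Accounting"]),
  ("Graphic Designer", ["Adobe Photoshop", "UI/UX Design", "Branding"]),
  ("Content Writer", ["Copywriting", "SEO Writing", "Blogging"]),
  ("Autonomous Systems Engineer", ["C++", "ROS (Robot Operating System)", "SLAM (Simultaneous Localization & Mapping)"]),
  ("Malware Analyst", ["C++", "Reverse Engineering", "Binary Analysis", "Cyber Forensics"])]

def recommend_jobs (user_skills : List String) : List (String × Int × List String) :=
  let recommendations := pvJobSkills.foldl (fun recs p =>
      let matching_skills := PySem.Set.inter (PySem.Set.ofList user_skills) (PySem.Set.ofList p.2)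
      let match_score : Int := matching_skills.length
      if match_score > 0 then recs ++ [(p.1, match_score, matching_skills)] else recs) []
  PySem.List.sorted recommendations (fun x => x.2.1) true

-- ===== PORT B =====
-- Source B's module-level table of pipe-delimited records (_TABLE)
def pvTable : List String := [
  "Software Engineer|Python|Java|C++|Algorithms|Software Development",
  "Data Analyst|SQL|Data Visualization|Excel|Statistical Analysis",
  "Project Manager|Team Leadership|Scheduling|Budget Management|Communication",
  "Machine Learning Engineer|TensorFlow|Scikit-Learn|AI Models|Data Preprocessing",
  "Backend Developer|Java|Spring Boot|Microservices|Databases",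
  "Frontend Developer|HTML|CSS|JavaScript|React.js|UI/UX Design",
  "Data Scientist|Machine Learning|Python|Deep Learning|Big Data|Statistics",
  "Cybersecurity Analyst|C++|Network Security|Cryptography|Penetration Testing",
  "Cloud Engineer|AWS|Azure|Google Cloud|DevOps|Kubernetes",
  "Blockchain Developer|Ethereum|Solidity|Smart Contracts|Hyperledger",
  "Game Developer|Unity|C#|Game Physics|3D Modeling|Game AI",
  "DevOps Engineer|CI/CD|Docker|Kubernetes|Linux|Cloud Deployment",
  "Automobile Engineer|Vehicle Dynamics|Engine Design|Automotive Electronics",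
  "Manufacturing Engineer|CAD/CAM|3D Printing|Lean Manufacturing",
  "Thermal Engineer|Heat Transfer|Thermodynamics|HVAC Systems",
  "Structural Engineer|AutoCAD|Reinforced Concrete Design|Seismic Analysis",
  "Construction Manager|Project Planning|Construction Safety|Cost Estimation",
  "Geotechnical Engineer|Soil Mechanics|Foundation Engineering|Slope Stability",
  "Power Systems Engineer|Electrical Grid Systems|Power Transmission|Energy Management",
  "Embedded Systems Engineer|Microcontrollers|FPGA|Real-Time Operating Systems",
  "Renewable Energy Engineer|Solar Power|Wind Energy|Battery Storage Systems",
  "VLSI Engineer|Chip Design|Semiconductor Technology|Verilog",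
  "Robotics Engineer|Embedded Systems|Actuators & Sensors|Robot Kinematics",
  "Telecom Engineer|Wireless Communication|5G Networks|Antenna Design",
  "AI Research Scientist|C++|Deep Learning|Neural Networks|Computer Vision",
  "Computer Vision Engineer|C++|OpenCV|Image Processing|Object Detection",
  "AI Product Manager|AI Ethics|Product Development|User Experience",
  "Digital Marketing Specialist|SEO|Social Media Marketing|Google Ads",
  "Human Resources Manager|Recruitment|Employee Relations|Performance Management",
  "Finance Analyst|Financial Modeling|Investment Analysis|Accounting",
  "Graphic Designer|Adobe Photoshop|UI/UX Design|Branding",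
  "Content Writer|Copywriting|SEO Writing|Blogging",
  "Autonomous Systems Engineer|C++|ROS (Robot Operating System)|SLAM (Simultaneous Localization & Mapping)",
  "Malware Analyst|C++|Reverse Engineering|Binary Analysis|Cyber Forensics"]

-- Source B's module-level parse loop: the job list in table order and the inverted index
def pvParsed : List String × PySem.Dict String (List String) :=
  pvTable.foldl (fun st line =>
    match (PySem.Str.split? line "|").getD [] with  -- sep nonempty: split? always returns
    | job :: skills =>
        (st.1 ++ [job],
         skills.foldl (fun ix s => ix.modify s [] (fun js => js ++ [job])) st.2)
    | [] => st)
  ([], PySem.Dict.empty)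

def recommend_jobs_alt (user_skills : List String) : List (String × Int × List String) :=
  let seen := PySem.List.dedup user_skills
  let acc := seen.foldl (fun acc s =>
      (pvParsed.2.getD s []).foldl (fun acc job => acc.modify job [] (fun ms => ms ++ [s])) acc)
    PySem.Dict.empty
  let recs := pvParsed.1.filterMap (fun job =>
      let m := acc.getD job []
      if m.isEmpty then none else some (job, (m.length : Int), PySem.Set.ofList m))
  PySem.List.sorted recs (fun r => -r.2.1) false

-- ===== PRECONDITION & SPEC =====
def Spec_recommend_jobs (user_skills : List String) (out : List (String × Int × List String)) : Prop := out = recommend_jobs_alt user_skills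
instance (user_skills : List String) (out : List (String × Int × List String)) : Decidable (Spec_recommend_jobs user_skills out) := by unfold Spec_recommend_jobs; infer_instance

-- ===== CLAIM =====
def Claim_equal_recommend_jobs : Prop := ∀ (user_skills : List String), Dom_recommend_jobs user_skills → Spec_recommend_jobs user_skills (recommend_jobs user_skills)

-- ===== LEMMAS AND PROOFS =====

-- the inverted index built directly from pvJobSkills (proof-side reference object)
def pvIndexRef : PySem.Dict String (List String) :=
  pvJobSkills.foldl (fun ix p => p.2.foldl (fun ix s => ix.modify s [] (fun js => js ++ [p.1])) ix)
    PySem.Dict.empty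

-- the records of the table split apart are exactly the (job, skills) rows of pvJobSkills
set_option maxRecDepth 100000 in
set_option maxHeartbeats 4000000 in
theorem pv_split_eq : pvTable.map (fun l => (PySem.Str.split? l "|").getD [])
    = pvJobSkills.map (fun p => p.1 :: p.2) := by decide

-- parsing each record and folding equals folding the split rows
theorem pv_fold_rows (lines : List String) (rows : List (String × List String))
    (h : lines.map (fun l => (PySem.Str.split? l "|").getD []) = rows.map (fun p => p.1 :: p.2)) :
    ∀ st : List String × PySem.Dict String (List String),
    lines.foldl (fun st line =>
        match (PySem.Str.split? line "|").getD [] with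
        | job :: skills =>
            (st.1 ++ [job], skills.foldl (fun ix s => ix.modify s [] (fun js => js ++ [job])) st.2)
        | [] => st) st
      = rows.foldl (fun st p =>
          (st.1 ++ [p.1], p.2.foldl (fun ix s => ix.modify s [] (fun js => js ++ [p.1])) st.2)) st := by
  induction lines generalizing rows with
  | nil => cases rows with
    | nil => intro st; rfl
    | cons r rs => simp at h
  | cons l t ih =>
    cases rows with
    | nil => simp at h
    | cons r rs =>
      simp only [List.map_cons, List.cons.injEq] at h
      intro st
      simp only [List.foldl_cons, h.1]
      exact ih rs h.2 _

-- a row fold over a pair state splits into the job list and the index fold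
theorem pv_parse_fold (l : List (String × List String))
    (st : List String × PySem.Dict String (List String)) :
    l.foldl (fun st p =>
        (st.1 ++ [p.1], p.2.foldl (fun ix s => ix.modify s [] (fun js => js ++ [p.1])) st.2)) st
      = (st.1 ++ l.map Prod.fst,
         l.foldl (fun ix p => p.2.foldl (fun ix s => ix.modify s [] (fun js => js ++ [p.1])) ix) st.2) := by
  induction l generalizing st with
  | nil => simp
  | cons p tl ih => simp [List.foldl_cons, ih]

-- Source B's parse of the record table yields exactly the jobs and the inverted index of pvJobSkills
theorem pv_parse_eq : pvParsed = (pvJobSkills.map Prod.fst, pvIndexRef) :=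
  Eq.trans (pv_fold_rows pvTable pvJobSkills pv_split_eq ([], PySem.Dict.empty))
    (by rw [pv_parse_fold]; simp [pvIndexRef])

-- a nested "for a in l: for k in f a: d.setdefault(k, []).append(v a)" loop, read back at one key
theorem pv_nest_getD {α β : Type} (l : List α) (f : α → List String) (v : α → β)
    (d : PySem.Dict String (List β)) (c : String) :
    (l.foldl (fun d a => (f a).foldl (fun d k => d.modify k [] (fun ms => ms ++ [v a])) d) d).getD c []
      = d.getD c [] ++ l.flatMap (fun a => List.replicate ((f a).count c) (v a)) := by
  induction l generalizing d with
  | nil => simp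
  | cons a t ih =>
    simp only [List.foldl_cons, List.flatMap_cons, ih]
    have h1 : (f a).foldl (fun d k => d.modify k [] (fun ms => ms ++ [v a])) d
        = ((f a).map (fun k => (k, v a))).foldl (fun d q => d.modify q.1 [] (fun ms => ms ++ [q.2])) d := by
      rw [List.foldl_map]
    rw [h1, PySem.Dict.getD_foldl_modify_append]
    have h2 : (((f a).map (fun k => (k, v a))).filter (fun q => q.1 == c)).map (fun q => q.2)
        = List.replicate ((f a).count c) (v a) := by
      rw [List.filter_map, List.map_map]
      simp only [Function.comp_def]
      rw [List.map_const', List.count, List.countP_eq_length_filter]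
    rw [h2, List.append_assoc]

-- counting one key inside the flattened inverted-index contributions, when keys are unique
theorem pv_count_flatMap (l : List (String × List String)) (hk : (l.map Prod.fst).Nodup)
    (j : String) (sk : List String) (h : (j, sk) ∈ l) (s : String) :
    (l.flatMap (fun p => List.replicate (p.2.count s) p.1)).count j = sk.count s := by
  induction l with
  | nil => cases h
  | cons p t ih =>
    simp only [List.map_cons, List.nodup_cons] at hk
    simp only [List.flatMap_cons, List.count_append]
    rcases List.mem_cons.1 h with h1 | h1
    · cases h1
      have hz : (t.flatMap (fun p => List.replicate (p.2.count s) p.1)).count j = 0 := by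
        rw [List.count_eq_zero]
        intro hm
        rcases List.mem_flatMap.1 hm with ⟨q, hq, hj⟩
        exact hk.1 (List.mem_map.2 ⟨q, hq, (List.eq_of_mem_replicate hj).symm⟩)
      rw [hz, List.count_replicate_self]
      simp
    · have hne : p.1 ≠ j := by
        intro he
        exact hk.1 (he ▸ (List.mem_map_of_mem h1 : (j, sk).fst ∈ t.map Prod.fst))
      have hz : (List.replicate (p.2.count s) p.1).count j = 0 := by
        rw [List.count_eq_zero]
        intro hm
        exact hne (List.eq_of_mem_replicate hm).symm
      rw [hz, ih hk.2 h1]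
      omega

-- replicate-by-count over a duplicate-free skill list is a filter
theorem pv_flatMap_filter (ds : List String) (sk : List String) (hsk : sk.Nodup) :
    ds.flatMap (fun s => List.replicate (sk.count s) s) = ds.filter (fun s => sk.contains s) := by
  induction ds with
  | nil => rfl
  | cons s t ih =>
    simp only [List.flatMap_cons, List.filter_cons]
    by_cases hm : s ∈ sk
    · have : sk.count s = 1 := List.count_eq_one_of_mem hsk hm
      simp [this, hm, ih]
    · have : sk.count s = 0 := List.count_eq_zero.2 hm
      simp [this, hm, ih]

theorem pv_keys_nodup : (pvJobSkills.map Prod.fst).Nodup := by decide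

theorem pv_skills_nodup : ∀ p ∈ pvJobSkills, (p.2 : List String).Nodup := by decide

-- what the accumulator holds at a job that appears in pvJobSkills
set_option maxRecDepth 8192 in
theorem pv_acc_getD (us : List String) (p : String × List String) (hp : p ∈ pvJobSkills) :
    ((PySem.List.dedup us).foldl (fun acc s =>
        (pvIndexRef.getD s []).foldl (fun acc job => acc.modify job [] (fun ms => ms ++ [s])) acc)
      PySem.Dict.empty).getD p.1 []
    = (PySem.Set.ofList us).filter (fun s => p.2.contains s) := by
  rw [pv_nest_getD]
  have hidx : ∀ s : String, pvIndexRef.getD s []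
      = pvJobSkills.flatMap (fun q => List.replicate (q.2.count s) q.1) := by
    intro s
    unfold pvIndexRef
    rw [pv_nest_getD]
    simp
  have hc : ∀ s : String, (pvIndexRef.getD s []).count p.1 = p.2.count s := by
    intro s
    rw [hidx s]
    exact pv_count_flatMap pvJobSkills pv_keys_nodup p.1 p.2 hp s
  simp only [hc]
  rw [pv_flatMap_filter _ _ (pv_skills_nodup p hp)]
  simp [PySem.List.dedup]

-- A's append-if loop as a filterMap (same emit test and payload)
theorem pv_fold_filterMap {α : Type} (l : List α) (k : α → String) (m : α → List String)
    (r : List (String × Int × List String)) :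
    l.foldl (fun recs p =>
        if ((m p).length : Int) > 0 then recs ++ [(k p, ((m p).length : Int), m p)] else recs) r
    = r ++ l.filterMap (fun p =>
        if (m p).isEmpty then none else some (k p, ((m p).length : Int), m p)) := by
  induction l generalizing r with
  | nil => simp
  | cons p t ih =>
    simp only [List.foldl_cons, List.filterMap_cons]
    by_cases he : (m p).isEmpty = true
    · have hl : (m p).length = 0 := by simpa [List.isEmpty_iff_length_eq_zero] using he
      have hcond : ¬ (((m p).length : Int) > 0) := by omega
      rw [if_neg hcond, if_pos he, ih]
    · have hl : 0 < (m p).length := by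
        rcases Nat.eq_zero_or_pos (m p).length with h0 | h0
        · exact absurd (List.isEmpty_iff_length_eq_zero.2 h0) he
        · exact h0
      have hl' : ((m p).length : Int) > 0 := by exact_mod_cast hl
      rw [if_pos hl', if_neg he, ih]
      simp

-- stable descending sort = stable ascending sort by the negated integer key
theorem pv_sorted_rev_neg {α : Type} (xs : List α) (key : α → Int) :
    PySem.List.sorted xs key true = PySem.List.sorted xs (fun x => -key x) false := by
  rw [PySem.List.sorted_rev_eq_foldl_insertBy, PySem.List.sorted_eq_foldl_insertBy]
  have : (fun (a b : α) => decide (-key a < -key b)) = (fun a b => decide (key b < key a)) := by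
    funext a b
    simp [neg_lt_neg_iff]
  rw [this]

-- ===== VERDICT (by name: the statement is the Claim_ definition above) =====
set_option maxRecDepth 100000 in
theorem recommend_jobs_spec : Claim_equal_recommend_jobs := by
  intro us _
  show recommend_jobs us = recommend_jobs_alt us
  unfold recommend_jobs recommend_jobs_alt
  dsimp only
  rw [pv_parse_eq]
  dsimp only
  rw [pv_fold_filterMap pvJobSkills (fun p => p.1)
      (fun p => PySem.Set.inter (PySem.Set.ofList us) (PySem.Set.ofList p.2)) []]
  rw [List.nil_append, pv_sorted_rev_neg]
  congr 1
  rw [List.filterMap_map]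
  apply List.filterMap_congr
  intro p hp
  have hM : PySem.Set.inter (PySem.Set.ofList us) (PySem.Set.ofList p.2)
      = (PySem.Set.ofList us).filter (fun s => p.2.contains s) := by
    unfold PySem.Set.inter
    apply List.filter_congr
    intro s _
    simp [PySem.Set.mem_ofList]
  have hnd : ((PySem.Set.ofList us).filter (fun s => p.2.contains s)).Nodup :=
    (PySem.Set.nodup_ofList us).filter _
  simp only [Function.comp_def]
  rw [pv_acc_getD us p hp, hM, PySem.Set.ofList_eq_self_of_nodup _ hnd]
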